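-- pv_equiv track=rewrite | github.com/caihuayu0322/hobbies | niu/report/niu_report.py | get_max_same_num
-- ===== SOURCE A (Python) =====
-- def get_max_same_num(data):
--     tmp_last_data = 0
--     old_max = 1
--     new_max = 1
--     distri = dict()
--
--     for k, v in enumerate(data):
--         if k == 0:
--             tmp_last_data = v
--             continue
--
--         if v != 0 and v == tmp_last_data:
--             new_max += 1
--         else:
--             old_max = max(new_max, old_max)
--             if new_max != 1:
--                 distri[new_max] = distri.get(new_max, 0) + 1
--             new_max = 1
--
--         tmp_last_data = v
--     else:
--         old_max = max(new_max, old_max)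
--         if new_max > 1:
--             distri[new_max] = distri.get(new_max, 0) + 1
--
--     total = 0
--     for (k, v) in distri.items():
--         total += v
--
--     res = dict()
--     for k in sorted(distri.keys(), key=lambda x: int(x)):
--         res[k] = (distri[k], '{:.2f}%'.format(100 * distri[k] / total))
--     return old_max, res
-- ===== SOURCE B (Python) =====
-- def get_max_same_num(data):
--     # decompose into maximal runs first, then aggregate; runs of zeros are ignored
--     runs = []
--     i, n = 0, len(data)
--     while i < n:
--         j = i + 1
--         while j < n and data[j] == data[i]:
--             j += 1
--         if data[i] != 0:
--             runs.append(j - i)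
--         i = j
--
--     old_max = 1
--     for c in runs:
--         if c > old_max:
--             old_max = c
--
--     distri = {}
--     for c in runs:
--         if c > 1:
--             distri[c] = distri.get(c, 0) + 1
--
--     total = sum(distri.values())
--     res = {k: (distri[k], '{:.2f}%'.format(100 * distri[k] / total))
--            for k in sorted(distri)}
--     return old_max, res
-- ===== Notes on version B (the rewrite author's own statement) =====
-- stated objective: simpler
-- what changed: A's one-pass state machine with duplicated flush logic (for/else) is replaced by first decomposing the list into its maximal nonzero run lengths with a nested index scan, then aggregating max and the >1-length distribution by plain folds over that runs list.
import Mathlib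
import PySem

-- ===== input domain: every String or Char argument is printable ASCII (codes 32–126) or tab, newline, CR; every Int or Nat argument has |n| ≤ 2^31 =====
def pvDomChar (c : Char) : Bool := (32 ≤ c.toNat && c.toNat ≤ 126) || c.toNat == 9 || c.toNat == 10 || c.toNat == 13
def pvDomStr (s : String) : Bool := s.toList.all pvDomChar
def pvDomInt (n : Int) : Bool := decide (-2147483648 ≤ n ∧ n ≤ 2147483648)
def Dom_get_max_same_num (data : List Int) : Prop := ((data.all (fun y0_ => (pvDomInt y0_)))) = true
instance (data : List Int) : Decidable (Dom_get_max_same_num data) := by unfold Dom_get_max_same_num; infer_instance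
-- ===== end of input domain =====

-- B is a different decomposition of the same computation (runs list first, then plain folds); same cost, return value proved identical.

-- shared helper: round-half-even of a/b for 0 ≤ a, 0 < b (CPython's correctly rounded division/formatting rule)
def pvRhe (a b : Int) : Int :=
  let q := a / b
  let r := a % b
  if 2 * r < b then q else if b < 2 * r then q + 1 else if q % 2 == 0 then q else q + 1

-- shared helper, exact model of "'{:.2f}%'.format(a/b)" for 0 < a ≤ 100*b (double rounding through binary64,
-- then half-even rounding to hundredths); both Pythons call the identical format on 100*distri[k]/total
def pvFmtPct (a b : Int) : String :=
  let s0 := (a * 2 ^ 1100) / b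
  let k : Int := (Nat.log2 s0.toNat : Int) - 1100
  let m : Int := 52 - k
  let s := if 0 ≤ m then pvRhe (a * 2 ^ m.toNat) b else pvRhe a (b * 2 ^ (-m).toNat)
  let sm : Int × Int := if s == 2 ^ 53 then (2 ^ 52, m - 1) else (s, m)
  let n := if 0 ≤ sm.2 then pvRhe (sm.1 * 100) (2 ^ sm.2.toNat) else sm.1 * 100 * 2 ^ (-sm.2).toNat
  let r := n % 100
  PySem.Int.toStr (n / 100) ++ "." ++ (if r < 10 then "0" ++ PySem.Int.toStr r else PySem.Int.toStr r) ++ "%"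

-- ===== PORT A =====
-- loop body of A's 'for k, v in enumerate(data)'; state = (tmp_last_data, old_max, new_max, distri)
def pvStepA (st : Int × Int × Int × PySem.Dict Int Int) (kv : Int × Int) :
    Int × Int × Int × PySem.Dict Int Int :=
  if kv.1 == 0 then (kv.2, st.2.1, st.2.2.1, st.2.2.2)
  else if kv.2 != 0 && kv.2 == st.1 then (kv.2, st.2.1, st.2.2.1 + 1, st.2.2.2)
  else (kv.2, max st.2.2.1 st.2.1, 1,
        if st.2.2.1 != 1 then st.2.2.2.insert st.2.2.1 (st.2.2.2.getD st.2.2.1 0 + 1) else st.2.2.2)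

def get_max_same_num (data : List Int) : Int × (List (Int × Int × String)) :=
  let st := (PySem.List.enumerate data).foldl pvStepA (0, 1, 1, PySem.Dict.empty)
  -- for/else: the else-block always runs (no break)
  let om := max st.2.2.1 st.2.1
  let d := if st.2.2.1 > 1 then st.2.2.2.insert st.2.2.1 (st.2.2.2.getD st.2.2.1 0 + 1) else st.2.2.2
  let total := d.items.foldl (fun t kv => t + kv.2) 0
  -- distri[k] ported as getD k 0: k ranges over distri's own keys, so the KeyError branch is unreachable
  let res := (PySem.List.sorted d.keys (fun x => x) false).foldl
    (fun (r : PySem.Dict Int (Int × String)) k =>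
      r.insert k (d.getD k 0, pvFmtPct (100 * d.getD k 0) total)) PySem.Dict.empty
  (om, res.items)

-- ===== PORT B =====
-- inner while of Source B: how many further elements equal data[i]
def pvEqRunN (x : Int) : List Int → Nat
  | [] => 0
  | y :: ys => if y = x then pvEqRunN x ys + 1 else 0

-- outer while of Source B: the list of maximal nonzero run lengths (j - i), left to right
def pvRuns : List Int → List Int
  | [] => []
  | x :: xs =>
    let e := pvEqRunN x xs
    (if x ≠ 0 then [(e : Int) + 1] else []) ++ pvRuns (xs.drop e)
termination_by l => l.length
decreasing_by simp

def get_max_same_num_alt (data : List Int) : Int × (List (Int × Int × String)) :=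
  let runs := pvRuns data
  let om := runs.foldl (fun m c => if c > m then c else m) 1
  let d := runs.foldl
    (fun (d : PySem.Dict Int Int) c => if c > 1 then d.insert c (d.getD c 0 + 1) else d)
    PySem.Dict.empty
  let total := d.values.sum
  let res := (PySem.List.sorted d.keys (fun x => x) false).foldl
    (fun (r : PySem.Dict Int (Int × String)) k =>
      r.insert k (d.getD k 0, pvFmtPct (100 * d.getD k 0) total)) PySem.Dict.empty
  (om, res.items)

-- ===== PRECONDITION & SPEC =====
def Spec_get_max_same_num (data : List Int) (out : Int × (List (Int × Int × String))) : Prop := out = get_max_same_num_alt data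
instance (data : List Int) (out : Int × (List (Int × Int × String))) : Decidable (Spec_get_max_same_num data out) := by unfold Spec_get_max_same_num; infer_instance

-- ===== CLAIM (what is proved, stated in full; the proofs are below) =====
def Claim_equal_get_max_same_num : Prop := ∀ (data : List Int), Dom_get_max_same_num data → Spec_get_max_same_num data (get_max_same_num data)

-- ===== LEMMAS AND PROOFS =====

-- A's loop body for k ≥ 1 (index ignored)
def pvStep (st : Int × Int × Int × PySem.Dict Int Int) (v : Int) :
    Int × Int × Int × PySem.Dict Int Int :=
  if v != 0 && v == st.1 then (v, st.2.1, st.2.2.1 + 1, st.2.2.2)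
  else (v, max st.2.2.1 st.2.1, 1,
        if st.2.2.1 != 1 then st.2.2.2.insert st.2.2.1 (st.2.2.2.getD st.2.2.1 0 + 1) else st.2.2.2)

-- A's for/else epilogue
def pvFinish (st : Int × Int × Int × PySem.Dict Int Int) : Int × PySem.Dict Int Int :=
  (max st.2.2.1 st.2.1,
   if st.2.2.1 > 1 then st.2.2.2.insert st.2.2.1 (st.2.2.2.getD st.2.2.1 0 + 1) else st.2.2.2)

def pvBump (d : PySem.Dict Int Int) (c : Int) : PySem.Dict Int Int :=
  if c > 1 then d.insert c (d.getD c 0 + 1) else d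

-- run list of x :: l when the current run of x already has length nm
def pvRunsF (nm x : Int) (l : List Int) : List Int :=
  (if x ≠ 0 then [nm + (pvEqRunN x l : Int)] else []) ++ pvRuns (l.drop (pvEqRunN x l))

lemma pvRuns_nil : pvRuns [] = [] := by rw [pvRuns.eq_def]

lemma pvRuns_consF (x : Int) (l : List Int) : pvRuns (x :: l) = pvRunsF 1 x l := by
  rw [pvRuns.eq_def, pvRunsF]
  by_cases hx : x = 0 <;> simp [hx, add_comm]

lemma pvEnum_foldl (xs : List Int) : ∀ (s : Int) (st : Int × Int × Int × PySem.Dict Int Int),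
    1 ≤ s → (PySem.List.enumerate xs s).foldl pvStepA st = xs.foldl pvStep st := by
  induction xs with
  | nil => intro s st _; rfl
  | cons v t ih =>
    intro s st hs
    rw [PySem.List.enumerate_cons, List.foldl_cons, List.foldl_cons, ih (s + 1) _ (by omega)]
    have : pvStepA st (s, v) = pvStep st v := by
      rw [pvStepA, pvStep]
      have hz : (s == 0) = false := by simp; omega
      simp [hz]
    rw [this]

lemma pvMain (l : List Int) : ∀ (x om nm : Int) (d : PySem.Dict Int Int),
    1 ≤ om → 1 ≤ nm → (x = 0 → nm = 1) →
    pvFinish (l.foldl pvStep (x, om, nm, d)) =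
      ((pvRunsF nm x l).foldl (fun m c => max c m) om, (pvRunsF nm x l).foldl pvBump d) := by
  induction l with
  | nil =>
    intro x om nm d hom hnm h0
    by_cases hx : x = 0
    · have h1 := h0 hx
      subst h1; subst hx
      simp [pvRunsF, pvEqRunN, pvRuns_nil, pvFinish]
      omega
    · simp [pvRunsF, pvEqRunN, pvRuns_nil, pvFinish, pvBump, hx]
  | cons v t ih =>
    intro x om nm d hom hnm h0
    by_cases hv : v ≠ 0 ∧ v = x
    · -- run continues
      have hx : x ≠ 0 := hv.2 ▸ hv.1
      have hstep : pvStep (x, om, nm, d) v = (x, om, nm + 1, d) := by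
        rw [pvStep]; simp [hv.2, hx]
      rw [List.foldl_cons, hstep, ih x om (nm + 1) d hom (by omega) (by intro h; exact absurd h hx)]
      have he : pvEqRunN x (v :: t) = pvEqRunN x t + 1 := by
        rw [pvEqRunN]; simp [hv.2]
      have hr : pvRunsF nm x (v :: t) = pvRunsF (nm + 1) x t := by
        rw [pvRunsF, pvRunsF, he]
        simp [hx]
        ring
      rw [hr]
    · -- boundary: close the current run, start a fresh one at v
      have hcond : (v != 0 && v == x) = false := by
        by_cases h1 : v = 0 <;> by_cases h2 : v = x <;> simp_all
      have hstep : pvStep (x, om, nm, d) v = (v, max nm om, 1, pvBump d nm) := by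
        rw [pvStep, pvBump]
        simp only [hcond, Bool.false_eq_true, if_false]
        by_cases h : nm = 1
        · simp [h]
        · have h' : 1 < nm := by omega
          simp [h, h']
      rw [List.foldl_cons, hstep,
          ih v (max nm om) 1 (pvBump d nm) (by omega) le_rfl (fun _ => rfl)]
      by_cases hx : x = 0
      · -- the closed run consisted of zeros: nm = 1, nothing is recorded
        have h1 := h0 hx
        subst h1; subst hx
        have hb : pvBump d 1 = d := by rw [pvBump]; simp
        rw [hb, max_eq_right hom]
        by_cases hv0 : v = 0
        · subst hv0
          have he : pvEqRunN (0 : Int) (0 :: t) = pvEqRunN 0 t + 1 := by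
            rw [pvEqRunN]; simp
          rw [pvRunsF, pvRunsF, he]
          simp
        · have he : pvEqRunN (0 : Int) (v :: t) = 0 := by
            rw [pvEqRunN]; simp [hv0]
          have hr : pvRunsF 1 0 (v :: t) = pvRunsF 1 v t := by
            rw [pvRunsF, he]
            simp [← pvRuns_consF]
          rw [hr]
      · -- run of x ≠ 0 of length nm closes; v ≠ x starts anew
        have hvx : v ≠ x := by
          intro h; subst h; exact hv ⟨fun h0' => hx (h0' ▸ rfl), rfl⟩
        have he : pvEqRunN x (v :: t) = 0 := by rw [pvEqRunN]; simp [hvx]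
        have hr : pvRunsF nm x (v :: t) = nm :: pvRunsF 1 v t := by
          rw [pvRunsF, he]
          simp [hx, ← pvRuns_consF]
        rw [hr, List.foldl_cons, List.foldl_cons]

lemma pvSumItems (d : PySem.Dict Int Int) :
    d.items.foldl (fun t kv => t + kv.2) 0 = d.values.sum := by
  simp only [PySem.Dict.values]
  rw [List.sum_eq_foldl, ← List.foldl_map]

lemma pvMaxFold (runs : List Int) (m0 : Int) :
    runs.foldl (fun m c => max c m) m0 = runs.foldl (fun m c => if c > m then c else m) m0 := by
  induction runs generalizing m0 with
  | nil => rfl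
  | cons c t ih =>
    rw [List.foldl_cons, List.foldl_cons, ih]
    congr 1
    by_cases h : c > m0 <;> simp [h] <;> omega

lemma pvAgg (data : List Int) :
    pvFinish ((PySem.List.enumerate data).foldl pvStepA (0, 1, 1, PySem.Dict.empty)) =
      ((pvRuns data).foldl (fun m c => if c > m then c else m) 1,
       (pvRuns data).foldl pvBump PySem.Dict.empty) := by
  cases data with
  | nil => rw [pvRuns_nil]; rfl
  | cons x xs =>
    have h0 : pvStepA (0, 1, 1, PySem.Dict.empty) ((0 : Int), x) =
        (x, 1, 1, PySem.Dict.empty) := by rw [pvStepA]; simp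
    rw [PySem.List.enumerate_cons, List.foldl_cons, h0, pvRuns_consF, ← pvMaxFold,
        show (0 : Int) + 1 = 1 from rfl, pvEnum_foldl xs 1 _ le_rfl,
        pvMain xs x 1 1 PySem.Dict.empty le_rfl le_rfl (fun _ => rfl)]

-- ===== VERDICT (by name: the statement is the Claim_ definition above) =====
theorem get_max_same_num_spec : Claim_equal_get_max_same_num := by
  intro data _
  unfold Spec_get_max_same_num get_max_same_num get_max_same_num_alt
  dsimp only
  have h := pvAgg data
  rw [pvFinish] at h
  have hom := congrArg Prod.fst h
  have hd := congrArg Prod.snd h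
  simp only at hom hd
  rw [hom, hd, pvSumItems]
  rfl
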